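-- pv_equiv track=rewrite | github.com/peterrhysstrong/cegpy_BMA | Bayesian_model_averaging_CEG.py | create_individual_hyperstages
-- ===== SOURCE A (Python) =====
-- import copy
--
-- def create_individual_hyperstages(hyperstage):
--     '''Creates multible hyperstages one for each hyperset in the hyperstage'''
--     new_hyperstage = {}
--     for k in range(len(hyperstage)):
--         temp_hyperstage = copy.deepcopy(hyperstage)
--         del temp_hyperstage[k]
--         new_hyperstage[k] = [[item] for sublist in temp_hyperstage for item in sublist]
--         new_hyperstage[k].append(hyperstage[k])
--     return new_hyperstage
-- ===== SOURCE B (Python) =====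
-- def create_individual_hyperstages(hyperstage):
--     '''Creates multible hyperstages one for each hyperset in the hyperstage'''
--     flat = [[item] for sublist in hyperstage for item in sublist]
--     new_hyperstage = {}
--     start = 0
--     for k, sublist in enumerate(hyperstage):
--         new_hyperstage[k] = flat[:start] + flat[start + len(sublist):] + [sublist]
--         start += len(sublist)
--     return new_hyperstage
-- ===== Notes on version B (the rewrite author's own statement) =====
-- stated objective: simpler
-- what changed: Flattens the hyperstage into singletons once and builds each per-index complement by splicing out that index's contiguous segment (flat[:start] + flat[start+len:]), instead of deepcopy + del + re-flatten for every index.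
import Mathlib
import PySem

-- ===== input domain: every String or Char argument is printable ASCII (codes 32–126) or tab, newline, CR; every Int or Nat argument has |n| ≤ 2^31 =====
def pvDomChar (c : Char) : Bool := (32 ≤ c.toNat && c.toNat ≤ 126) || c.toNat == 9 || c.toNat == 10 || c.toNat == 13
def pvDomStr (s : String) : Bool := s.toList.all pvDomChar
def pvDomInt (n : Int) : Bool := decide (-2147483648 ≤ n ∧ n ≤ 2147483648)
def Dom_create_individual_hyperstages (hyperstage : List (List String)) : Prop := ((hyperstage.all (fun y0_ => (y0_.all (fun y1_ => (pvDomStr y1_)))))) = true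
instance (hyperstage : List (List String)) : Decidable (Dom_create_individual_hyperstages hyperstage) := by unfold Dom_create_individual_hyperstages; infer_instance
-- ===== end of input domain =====

-- B flattens the hyperstage into singletons ONCE and obtains each per-index complement by
-- splicing out that index's contiguous segment of the flat list, instead of A's
-- deepcopy + del + re-flatten per index. (Equivalence is about the returned value;
-- A's deepcopy vs B's aliasing of inner lists is not observable in the return value.)

-- ===== PORT A =====
-- loop body for one k: temp = deepcopy(hyperstage); del temp[k]; [[item] ...] ; append hyperstage[k]
-- k comes from range(len(hyperstage)), so k ≥ 0 and k < len: k.toNat is exact and pyGetD's default is never used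
def cihBodyA (hyperstage : List (List String)) (k : Int) : Int × List (List String) :=
  let temp_hyperstage := hyperstage.eraseIdx k.toNat
  (k, (temp_hyperstage.flatMap (fun sublist => sublist.map (fun item => [item])))
        ++ [PySem.List.pyGetD hyperstage k []])

def create_individual_hyperstages (hyperstage : List (List String)) : List (Int × List (List String)) :=
  (PySem.List.pyRange 0 (hyperstage.length : Int) 1).map (fun k => cihBodyA hyperstage k)

-- ===== PORT B =====
-- the enumerate-loop of Source B with its running 'start' offset, recursion over the sublists
def cihGoB (flat : List (List String)) (start : Nat) (k : Int) :
    List (List String) → List (Int × List (List String))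
  | [] => []
  | sublist :: rest =>
      (k, flat.take start ++ flat.drop (start + sublist.length) ++ [sublist])
        :: cihGoB flat (start + sublist.length) (k + 1) rest

def create_individual_hyperstages_alt (hyperstage : List (List String)) : List (Int × List (List String)) :=
  let flat := hyperstage.flatMap (fun sublist => sublist.map (fun item => [item]))
  cihGoB flat 0 0 hyperstage

-- ===== PRECONDITION & SPEC =====
def Spec_create_individual_hyperstages (hyperstage : List (List String)) (out : List (Int × List (List String))) : Prop := out = create_individual_hyperstages_alt hyperstage
instance (hyperstage : List (List String)) (out : List (Int × List (List String))) : Decidable (Spec_create_individual_hyperstages hyperstage out) := by unfold Spec_create_individual_hyperstages; infer_instance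

-- ===== CLAIM (what is proved, stated in full; the proofs are below) =====
def Claim_equal_create_individual_hyperstages : Prop := ∀ (hyperstage : List (List String)), Dom_create_individual_hyperstages hyperstage → Spec_create_individual_hyperstages hyperstage (create_individual_hyperstages hyperstage)

-- ===== LEMMAS AND PROOFS =====

def flatS (l : List (List String)) : List (List String) :=
  l.flatMap (fun sublist => sublist.map (fun item => [item]))

theorem flatS_append (a b : List (List String)) : flatS (a ++ b) = flatS a ++ flatS b := by
  simp [flatS]

theorem eraseIdx_append_cons (pre : List (List String)) (x : List String) (rest : List (List String)) :
    (pre ++ x :: rest).eraseIdx pre.length = pre ++ rest := by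
  induction pre with
  | nil => simp
  | cons h t ih => simp [ih]

theorem flatS_len_append (pre : List (List String)) (sublist : List String) :
    (flatS (pre ++ [sublist])).length = (flatS pre).length + sublist.length := by
  simp [flatS]

theorem go_eq (rest pre : List (List String)) :
    (PySem.List.pyRange (pre.length : Int) ((pre.length : Int) + rest.length) 1).map
        (fun k => cihBodyA (pre ++ rest) k)
      = cihGoB (flatS (pre ++ rest)) (flatS pre).length (pre.length : Int) rest := by
  induction rest generalizing pre with
  | nil => simp [PySem.List.pyRange_one_eq_nil, cihGoB]
  | cons sublist rest ih =>
    have hlt : (pre.length : Int) < (pre.length : Int) + (sublist :: rest).length := by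
      simp
    have h1 : flatS (pre ++ sublist :: rest)
        = (flatS pre ++ sublist.map (fun item => [item])) ++ flatS rest := by
      rw [show pre ++ sublist :: rest = pre ++ [sublist] ++ rest by simp,
          flatS_append, flatS_append]
      simp [flatS]
    have ht : (flatS (pre ++ sublist :: rest)).take (flatS pre).length = flatS pre := by
      rw [h1, List.append_assoc, List.take_left]
    have hd : (flatS (pre ++ sublist :: rest)).drop ((flatS pre).length + sublist.length)
        = flatS rest := by
      rw [h1, List.drop_left' (by simp)]
    rw [PySem.List.pyRange_one_cons hlt, List.map_cons, cihGoB]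
    congr 1
    · rw [ht, hd]
      simp [cihBodyA, flatS, eraseIdx_append_cons]
    · have ih' := ih (pre ++ [sublist])
      rw [flatS_len_append] at ih'
      simp only [List.append_assoc, List.singleton_append, List.length_append,
        List.length_cons, List.length_nil] at ih'
      push_cast at ih' ⊢
      rw [show (pre.length : Int) + ((sublist :: rest).length : Int)
            = (pre.length : Int) + 1 + (rest.length : Int) from by simp; ring]
      exact ih'

theorem create_individual_hyperstages_spec : Claim_equal_create_individual_hyperstages := by
  intro hyperstage _
  unfold Spec_create_individual_hyperstages create_individual_hyperstages
    create_individual_hyperstages_alt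
  have h := go_eq hyperstage []
  simpa [flatS] using h

-- ===== VERDICT (by name: the statement is the Claim_ definition above) =====
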